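-- pv_equiv track=rewrite | github.com/DylanAo/AHU-AI-Repository | Python/实验5.py | give_repeat
-- ===== SOURCE A (Python) =====
-- def delet_repeat(data):
--     original_list = data
--     dic_list = []
--     for i in range(len(original_list)):
--         if original_list[i] not in dic_list:
--             dic_list.append(original_list[i])
--     return dic_list
--
-- def give_repeat(data):
--     dic_list = []
--     for target in data:
--         flag = 0
--         for object in data:
--             if target == object:
--                 flag += 1
--             if flag == 2:
--                 dic_list.append(target)
--     return delet_repeat(dic_list)
-- ===== SOURCE B (Python) =====
-- def give_repeat(data):
--     seen = []
--     for x in data: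
--         if x not in seen:
--             seen.append(x)
--     return [x for x in seen if sum(1 for y in data if y == x) >= 2]
-- ===== Notes on version B (the rewrite author's own statement) =====
-- stated objective: simpler
-- what changed: A counts each occurrence against the whole list (appending a target every time its running flag equals 2) into an intermediate multi-list and deduplicates it afterwards; B first deduplicates the input into first-occurrence order and then keeps exactly the elements whose recount is at least 2, with no intermediate multi-list.
import Mathlib
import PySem

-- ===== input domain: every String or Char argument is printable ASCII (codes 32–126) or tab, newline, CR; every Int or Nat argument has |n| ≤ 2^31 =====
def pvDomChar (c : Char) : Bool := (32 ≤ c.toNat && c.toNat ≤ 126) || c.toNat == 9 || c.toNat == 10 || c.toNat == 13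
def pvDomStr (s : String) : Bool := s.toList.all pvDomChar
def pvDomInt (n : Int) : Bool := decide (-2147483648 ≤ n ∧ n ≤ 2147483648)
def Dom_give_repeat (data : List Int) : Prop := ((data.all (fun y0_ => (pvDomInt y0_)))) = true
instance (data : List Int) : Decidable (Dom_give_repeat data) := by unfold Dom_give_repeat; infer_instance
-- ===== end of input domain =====

-- B restructures A: A appends a target to an intermediate multi-list every time its running
-- count hits 2 and deduplicates afterwards; B deduplicates first and filters by a fresh recount
-- (objective: simpler — no intermediate multi-list). Same O(n^2) cost; return value only.

-- ===== PORT A =====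
-- helper of A: first-occurrence dedup ('not in' loop over the indices)
def delet_repeat (data : List Int) : List Int :=
  data.foldl (fun dic_list x => if x ∈ dic_list then dic_list else dic_list ++ [x]) []

-- one iteration of A's inner loop: bump flag on a match, append target whenever flag == 2
def innerStep (target : Int) (s : Int × List Int) (obj : Int) : Int × List Int :=
  let flag := if target = obj then s.1 + 1 else s.1
  (flag, if flag = 2 then s.2 ++ [target] else s.2)

def give_repeat (data : List Int) : List Int :=
  delet_repeat
    (data.foldl (fun dic_list target => (data.foldl (innerStep target) (0, dic_list)).2) [])

-- ===== PORT B =====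
def give_repeat_alt (data : List Int) : List Int :=
  let seen := data.foldl (fun seen x => if x ∈ seen then seen else seen ++ [x]) []
  seen.filter (fun x => decide (2 ≤ data.foldl (fun c y => if y = x then c + 1 else c) (0 : Int)))

-- ===== PRECONDITION & SPEC =====
def Spec_give_repeat (data : List Int) (out : List Int) : Prop := out = give_repeat_alt data
instance (data : List Int) (out : List Int) : Decidable (Spec_give_repeat data out) := by unfold Spec_give_repeat; infer_instance

-- ===== CLAIM (what is proved, stated in full; the proofs are below) =====
def Claim_equal_give_repeat : Prop := ∀ (data : List Int), Dom_give_repeat data → Spec_give_repeat data (give_repeat data)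

-- ===== LEMMAS AND PROOFS =====

-- the dedup fold, from an arbitrary accumulator
def ins (acc : List Int) (l : List Int) : List Int :=
  l.foldl (fun a x => if x ∈ a then a else a ++ [x]) acc

-- occurrence count of t
def cnt : List Int → Int → Int
  | [], _ => 0
  | y :: l, t => (if y = t then 1 else 0) + cnt l t

-- the inner-loop output for one target, started from an empty dic
def block (data : List Int) (t : Int) : List Int :=
  (data.foldl (innerStep t) (0, [])).2

theorem cnt_foldl (t : Int) : ∀ (l : List Int) (c : Int),
    l.foldl (fun c y => if y = t then c + 1 else c) c = c + cnt l t := by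
  intro l
  induction l with
  | nil => intro c; simp [cnt]
  | cons x xs ih =>
    intro c
    simp only [List.foldl_cons, cnt]
    rw [ih]
    by_cases h : x = t
    all_goals simp [h]
    all_goals omega

theorem cnt_nonneg (l : List Int) (t : Int) : 0 ≤ cnt l t := by
  induction l with
  | nil => simp [cnt]
  | cons x xs ih => simp only [cnt]; split <;> omega

-- the inner dic only grows (length)
theorem inner_len (t : Int) : ∀ (l : List Int) (f : Int) (d : List Int),
    d.length ≤ (l.foldl (innerStep t) (f, d)).2.length := by
  intro l
  induction l with
  | nil => intro f d; exact le_rfl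
  | cons x xs ih =>
    intro f d
    simp only [List.foldl_cons, innerStep]
    by_cases hx : t = x
    · simp only [if_pos hx]
      by_cases h2 : f + 1 = 2
      · simp only [if_pos h2]; exact le_trans (by simp) (ih (f + 1) (d ++ [t]))
      · simp only [if_neg h2]; exact ih (f + 1) d
    · simp only [if_neg hx]
      by_cases h2 : f = 2
      · simp only [if_pos h2]; exact le_trans (by simp) (ih f (d ++ [t]))
      · simp only [if_neg h2]; exact ih f d

-- the inner loop only appends: result = d ++ (result from [])
theorem inner_append (t : Int) : ∀ (l : List Int) (f : Int) (d : List Int),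
    (l.foldl (innerStep t) (f, d)).2 = d ++ (l.foldl (innerStep t) (f, [])).2 := by
  intro l
  induction l with
  | nil => intro f d; simp
  | cons x xs ih =>
    intro f d
    simp only [List.foldl_cons, innerStep]
    by_cases hx : t = x
    · simp only [if_pos hx]
      by_cases h2 : f + 1 = 2
      · simp only [if_pos h2, List.nil_append]
        rw [ih (f + 1) (d ++ [t]), ih (f + 1) [t]]
        simp
      · simp only [if_neg h2]; exact ih (f + 1) d
    · simp only [if_neg hx]
      by_cases h2 : f = 2
      · simp only [if_pos h2, List.nil_append]
        rw [ih f (d ++ [t]), ih f [t]]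
        simp
      · simp only [if_neg h2]; exact ih f d

-- every element the inner loop appends is the target
theorem inner_mem (t : Int) : ∀ (l : List Int) (f : Int) (d : List Int),
    (∀ x ∈ d, x = t) → ∀ x ∈ (l.foldl (innerStep t) (f, d)).2, x = t := by
  intro l
  induction l with
  | nil => intro f d hd; simpa using hd
  | cons y ys ih =>
    intro f d hd
    have hd' : ∀ x ∈ d ++ [t], x = t := by
      intro x hx
      rcases List.mem_append.1 hx with h | h
      · exact hd x h
      · simpa using h
    simp only [List.foldl_cons, innerStep]
    by_cases hx : t = y
    · simp only [if_pos hx]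
      by_cases h2 : f + 1 = 2
      · simp only [if_pos h2]; exact ih (f + 1) (d ++ [t]) hd'
      · simp only [if_neg h2]; exact ih (f + 1) d hd
    · simp only [if_neg hx]
      by_cases h2 : f = 2
      · simp only [if_pos h2]; exact ih f (d ++ [t]) hd'
      · simp only [if_neg h2]; exact ih f d hd

-- the inner loop leaves dic unchanged iff flag never reaches 2
theorem inner_empty (t : Int) : ∀ (l : List Int) (f : Int) (d : List Int), f < 2 →
    ((l.foldl (innerStep t) (f, d)).2 = d ↔ f + cnt l t < 2) := by
  intro l
  induction l with
  | nil => intro f d hf; simp [cnt]; omega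
  | cons x xs ih =>
    intro f d hf
    simp only [List.foldl_cons, innerStep, cnt]
    by_cases hx : t = x
    · simp only [if_pos hx, if_pos hx.symm]
      by_cases h2 : f + 1 = 2
      · simp only [if_pos h2]
        constructor
        · intro hc
          exfalso
          have hl := inner_len t xs (f + 1) (d ++ [t])
          rw [hc] at hl
          simp at hl
        · intro hlt
          exact absurd (cnt_nonneg xs t) (by omega)
      · simp only [if_neg h2]
        rw [ih (f + 1) d (by omega)]
        omega
    · have hx' : ¬ x = t := fun h => hx h.symm
      simp only [if_neg hx, if_neg hx', if_neg (show ¬ f = 2 by omega)]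
      rw [ih f d hf]
      omega

-- outer loop = flatMap of per-target blocks
theorem outer_flatMap (data : List Int) : ∀ (ts : List Int) (dic : List Int),
    ts.foldl (fun dic target => (data.foldl (innerStep target) (0, dic)).2) dic
      = dic ++ ts.flatMap (fun t => block data t) := by
  intro ts
  induction ts with
  | nil => intro dic; simp
  | cons t ts ih =>
    intro dic
    simp only [List.foldl_cons, List.flatMap_cons]
    rw [inner_append, ih]
    simp [block]

-- inserting an all-t list into an acc that already holds t changes nothing
theorem ins_const_mem (t : Int) : ∀ (b : List Int) (acc : List Int),
    (∀ x ∈ b, x = t) → t ∈ acc → ins acc b = acc := by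
  intro b
  induction b with
  | nil => intro acc _ _; rfl
  | cons x xs ih =>
    intro acc hb ht
    have hx : x = t := hb x (by simp)
    simp only [ins, List.foldl_cons]
    rw [if_pos (hx ▸ ht)]
    exact ih acc (fun y hy => hb y (by simp [hy])) ht

-- inserting a nonempty all-t list = inserting t once
theorem ins_const (t : Int) (b : List Int) (acc : List Int)
    (hb : ∀ x ∈ b, x = t) (hne : b ≠ []) :
    ins acc b = if t ∈ acc then acc else acc ++ [t] := by
  cases b with
  | nil => exact absurd rfl hne
  | cons x xs =>
    have hx : x = t := hb x (by simp)
    subst hx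
    simp only [ins, List.foldl_cons]
    by_cases hm : x ∈ acc
    · rw [if_pos hm]
      exact ins_const_mem x xs acc (fun y hy => hb y (by simp [hy])) hm
    · rw [if_neg hm]
      exact ins_const_mem x xs (acc ++ [x]) (fun y hy => hb y (by simp [hy])) (by simp)

theorem ins_append (acc l₁ l₂ : List Int) : ins acc (l₁ ++ l₂) = ins (ins acc l₁) l₂ := by
  simp [ins, List.foldl_append]

theorem ins_cons (acc : List Int) (x : Int) (l : List Int) :
    ins acc (x :: l) = ins (if x ∈ acc then acc else acc ++ [x]) l := rfl

-- dedup of the blocks = dedup of the targets whose count is ≥ 2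
theorem ins_blocks (data : List Int) : ∀ (ts : List Int) (acc : List Int),
    ins acc (ts.flatMap (fun t => block data t))
      = ins acc (ts.filter (fun t => decide (2 ≤ cnt data t))) := by
  intro ts
  induction ts with
  | nil => intro acc; rfl
  | cons t ts ih =>
    intro acc
    have hmem : ∀ x ∈ block data t, x = t := inner_mem t data 0 [] (by simp)
    have hempty := inner_empty t data 0 [] (by omega)
    by_cases h : 2 ≤ cnt data t
    · have hne : block data t ≠ [] := by
        intro hc
        have := hempty.1 hc
        omega
      have hfil : (t :: ts).filter (fun t => decide (2 ≤ cnt data t))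
          = t :: ts.filter (fun t => decide (2 ≤ cnt data t)) := by simp [h]
      rw [hfil, ins_cons, List.flatMap_cons, ins_append, ins_const t _ acc hmem hne]
      exact ih _
    · have he : block data t = [] := hempty.2 (by omega)
      have hfil : (t :: ts).filter (fun t => decide (2 ≤ cnt data t))
          = ts.filter (fun t => decide (2 ≤ cnt data t)) := by simp [h]
      rw [hfil, List.flatMap_cons, he, List.nil_append]
      exact ih acc

-- the dedup fold commutes with a value filter
theorem ins_filter (p : Int → Bool) : ∀ (l : List Int) (acc : List Int),
    ins (acc.filter p) (l.filter p) = (ins acc l).filter p := by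
  intro l
  induction l with
  | nil => intro acc; rfl
  | cons x xs ih =>
    intro acc
    simp only [List.filter_cons]
    by_cases hp : p x
    · rw [if_pos hp, ins_cons, ins_cons]
      by_cases hm : x ∈ acc
      · rw [if_pos (List.mem_filter.2 ⟨hm, hp⟩), if_pos hm]
        exact ih acc
      · rw [if_neg (fun hc => hm (List.mem_filter.1 hc).1), if_neg hm]
        rw [show acc.filter p ++ [x] = (acc ++ [x]).filter p by simp [List.filter_append, hp]]
        exact ih (acc ++ [x])
    · rw [if_neg hp, ins_cons]
      by_cases hm : x ∈ acc
      · rw [if_pos hm]; exact ih acc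
      · rw [if_neg hm]
        rw [show acc.filter p = (acc ++ [x]).filter p by simp [List.filter_append, hp]]
        exact ih (acc ++ [x])

-- ===== VERDICT (by name: the statement is the Claim_ definition above) =====
theorem give_repeat_spec : Claim_equal_give_repeat := by
  intro data _
  show give_repeat data = give_repeat_alt data
  have h1 : give_repeat data = ins [] (data.flatMap (fun t => block data t)) := by
    show ins [] (data.foldl (fun dic target => (data.foldl (innerStep target) (0, dic)).2) [])
        = _
    rw [outer_flatMap data data []]
    simp
  have h2 : give_repeat_alt data
      = (ins [] data).filter (fun x => decide (2 ≤ cnt data x)) := by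
    show (ins [] data).filter _ = _
    congr 1
    funext x
    rw [cnt_foldl x data 0]
    simp
  rw [h1, ins_blocks data data, h2, ← ins_filter]
  rfl
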